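-- pv_equiv track=rewrite | github.com/jeekim2/algostudy_ind | Problems/18111/ans_18111_JHK.py | get_build_time
-- ===== SOURCE A (Python) =====
-- def get_build_time(Ground, h, B):
--     res = 0
--     for v in Ground:
--         if v > h:
--             res += 2 * (v - h)
--             B += v - h
--         else:
--             res += h - v
--             B -= h - v
--     if B < 0:
--         return -1
--     return res
-- ===== SOURCE B (Python) =====
-- def get_build_time(Ground, h, B):
--     g = sorted(Ground)
--     n = len(g)
--     idx = n
--     for i in range(n):
--         if g[i] > h:
--             idx = i
--             break
--     low = g[:idx]
--     high = g[idx:]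
--     deficit = h * idx - sum(low)
--     excess = sum(high) - h * (n - idx)
--     if B + sum(g) - n * h < 0:
--         return -1
--     return 2 * excess + deficit
-- ===== Notes on version B (the rewrite author's own statement) =====
-- stated objective: alternative
-- what changed: Replaces the single branching loop with a sort-then-split algorithm: sort the heights, find the split point above h, and compute excess/deficit and the budget check from whole-block sums of the two slices in closed form.
import Mathlib
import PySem

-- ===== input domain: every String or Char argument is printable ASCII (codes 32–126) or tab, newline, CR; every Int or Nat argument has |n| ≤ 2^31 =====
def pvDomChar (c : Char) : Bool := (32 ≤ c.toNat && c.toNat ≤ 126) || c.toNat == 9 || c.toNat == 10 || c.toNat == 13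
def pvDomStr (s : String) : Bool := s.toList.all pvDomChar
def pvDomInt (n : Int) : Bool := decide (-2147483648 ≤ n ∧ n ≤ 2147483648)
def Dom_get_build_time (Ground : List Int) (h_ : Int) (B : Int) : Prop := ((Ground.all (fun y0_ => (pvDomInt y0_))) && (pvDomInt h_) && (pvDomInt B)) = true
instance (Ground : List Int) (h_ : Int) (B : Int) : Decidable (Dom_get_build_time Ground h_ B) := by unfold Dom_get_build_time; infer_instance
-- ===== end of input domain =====

-- B replaces A's single branching loop by sort-then-split: sort the heights, locate the first height above h, and
-- read the answer and the budget check off whole-block sums of the two slices (alternative algorithm, O(n log n)).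

-- ===== PORT A =====
def get_build_time (Ground : List Int) (h_ : Int) (B : Int) : Int :=
  let st := Ground.foldl
    (fun (p : Int × Int) v =>
      if v > h_ then (p.1 + 2 * (v - h_), p.2 + (v - h_))
      else (p.1 + (h_ - v), p.2 - (h_ - v)))
    (0, B)
  if st.2 < 0 then -1 else st.1

-- ===== PORT B =====
-- the 'for i in range(n): if g[i] > h: idx = i; break' loop: first index with g[i] > h, none if no break
def gbtScan (h_ : Int) : List Int → Nat → Option Nat
  | [], _ => none
  | v :: r, i => if h_ < v then some i else gbtScan h_ r (i + 1)

def get_build_time_alt (Ground : List Int) (h_ : Int) (B : Int) : Int :=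
  let g := PySem.List.sorted Ground (fun x => x) false
  let n := g.length
  let idx := (gbtScan h_ g 0).getD n
  let low := PySem.List.slice g none (some (idx : Int))
  let high := PySem.List.slice g (some (idx : Int)) none
  let deficit := h_ * (idx : Int) - low.sum
  let excess := high.sum - h_ * ((n : Int) - (idx : Int))
  if B + g.sum - (n : Int) * h_ < 0 then -1 else 2 * excess + deficit

-- ===== PRECONDITION & SPEC =====
def Spec_get_build_time (Ground : List Int) (h_ : Int) (B : Int) (out : Int) : Prop := out = get_build_time_alt Ground h_ B
instance (Ground : List Int) (h_ : Int) (B : Int) (out : Int) : Decidable (Spec_get_build_time Ground h_ B out) := by unfold Spec_get_build_time; infer_instance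

-- ===== CLAIM (what is proved, stated in full; the proofs are below) =====
def Claim_equal_get_build_time : Prop := ∀ (Ground : List Int) (h_ : Int) (B : Int), Dom_get_build_time Ground h_ B → Spec_get_build_time Ground h_ B (get_build_time Ground h_ B)

-- ===== LEMMAS AND PROOFS =====

-- closed form of A's loop
theorem get_build_time_foldl_closed (h_ : Int) (Ground : List Int) (r b : Int) :
    Ground.foldl
      (fun (p : Int × Int) v =>
        if v > h_ then (p.1 + 2 * (v - h_), p.2 + (v - h_))
        else (p.1 + (h_ - v), p.2 - (h_ - v)))
      (r, b)
    = (r + 2 * ((Ground.filter (fun v => h_ < v)).map (fun v => v - h_)).sum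
         + ((Ground.filter (fun v => v ≤ h_)).map (fun v => h_ - v)).sum,
       b + ((Ground.filter (fun v => h_ < v)).map (fun v => v - h_)).sum
         - ((Ground.filter (fun v => v ≤ h_)).map (fun v => h_ - v)).sum) := by
  induction Ground generalizing r b with
  | nil => simp
  | cons x xs ih =>
    simp only [List.foldl_cons, List.filter_cons]
    by_cases hx : h_ < x
    · rw [if_pos hx]
      simp only [decide_eq_true hx, if_pos, decide_eq_false (not_le.mpr hx), if_neg Bool.false_ne_true]
      rw [ih]
      simp only [Prod.mk.injEq, List.map_cons, List.sum_cons]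
      constructor <;> ring
    · rw [if_neg hx]
      have hle : x ≤ h_ := not_lt.mp hx
      simp only [decide_eq_false hx, decide_eq_true hle, if_neg Bool.false_ne_true, if_pos]
      rw [ih]
      simp only [Prod.mk.injEq, List.map_cons, List.sum_cons]
      constructor <;> ring

-- the scan returns the length of the ≤-prefix (with the list length as the no-break default)
theorem gbtScan_getD (h_ : Int) :
    ∀ (g : List Int) (i : Nat),
      (gbtScan h_ g i).getD (i + g.length)
        = i + (g.takeWhile (fun v => decide (v ≤ h_))).length := by
  intro g
  induction g with
  | nil => intro i; simp [gbtScan]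
  | cons v r ih =>
    intro i
    by_cases hv : h_ < v
    · simp [gbtScan, hv, decide_eq_false (not_le.mpr hv)]
    · have hle : v ≤ h_ := not_lt.mp hv
      have : (gbtScan h_ (v :: r) i) = gbtScan h_ r (i + 1) := by simp [gbtScan, hv]
      rw [this]
      have := ih (i + 1)
      simp only [List.length_cons, List.takeWhile_cons, decide_eq_true hle] at *
      rw [show i + (r.length + 1) = (i + 1) + r.length by omega, this]
      simp; omega

-- on a sorted list the ≤-prefix is exactly the ≤-filter, and the remainder the >-filter
theorem sorted_takeWhile_eq_filter (h_ : Int) :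
    ∀ (g : List Int), g.Pairwise (· ≤ ·) →
      g.takeWhile (fun v => decide (v ≤ h_)) = g.filter (fun v => decide (v ≤ h_))
      ∧ g.dropWhile (fun v => decide (v ≤ h_)) = g.filter (fun v => decide (h_ < v)) := by
  intro g
  induction g with
  | nil => intro _; simp
  | cons v r ih =>
    intro hp
    rcases List.pairwise_cons.mp hp with ⟨hall, hr⟩
    rcases ih hr with ⟨iht, ihd⟩
    by_cases hv : v ≤ h_
    · constructor
      · simp [decide_eq_true hv, iht]
      · simp [List.dropWhile_cons, List.filter_cons, decide_eq_true hv,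
              decide_eq_false (not_lt.mpr hv), ihd]
    · have hgt : h_ < v := not_le.mp hv
      have hfe : r.filter (fun v => decide (v ≤ h_)) = [] := by
        rw [List.filter_eq_nil_iff]
        intro x hx
        simp only [decide_eq_true_eq]
        exact fun hxle => absurd (le_trans (hall x hx) hxle) (not_le.mpr hgt)
      have hfg : r.filter (fun v => decide (h_ < v)) = r := by
        rw [List.filter_eq_self]
        intro x hx
        exact decide_eq_true (lt_of_lt_of_le hgt (hall x hx))
      constructor
      · simp [decide_eq_false hv, hfe]
      · simp [List.dropWhile_cons, List.filter_cons, decide_eq_false hv,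
              decide_eq_true hgt, hfg]

-- block-sum arithmetic: sum of (h - v) resp. (v - h) over a block
theorem sum_map_const_sub (h_ : Int) :
    ∀ (l : List Int), (l.map (fun v => h_ - v)).sum = (l.length : Int) * h_ - l.sum := by
  intro l
  induction l with
  | nil => simp
  | cons x xs ih => simp [ih]; ring

theorem sum_map_sub_const (h_ : Int) :
    ∀ (l : List Int), (l.map (fun v => v - h_)).sum = l.sum - (l.length : Int) * h_ := by
  intro l
  induction l with
  | nil => simp
  | cons x xs ih => simp [ih]; ring

-- ===== VERDICT (by name: the statement is the Claim_ definition above) =====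
theorem get_build_time_spec : Claim_equal_get_build_time := by
  intro Ground h_ B _
  unfold Spec_get_build_time get_build_time get_build_time_alt
  rw [get_build_time_foldl_closed]
  set g := PySem.List.sorted Ground (fun x => x) false with hg
  have hperm : g.Perm Ground := PySem.List.sorted_perm Ground (fun x => x) false
  have hpair : g.Pairwise (· ≤ ·) := PySem.List.sorted_pairwise Ground (fun x => x)
  rcases sorted_takeWhile_eq_filter h_ g hpair with ⟨htw, hdw⟩
  set L := g.filter (fun v => decide (v ≤ h_)) with hL
  set H := g.filter (fun v => decide (h_ < v)) with hH
  have hsplit : L ++ H = g := by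
    rw [← htw, ← hdw]; exact List.takeWhile_append_dropWhile
  have hidx : (gbtScan h_ g 0).getD g.length = L.length := by
    have := gbtScan_getD h_ g 0
    simpa [htw] using this
  have hlow : PySem.List.slice g none (some ((L.length : Nat) : Int)) = L := by
    rw [PySem.List.slice_to_natCast, ← hsplit, List.take_left]
  have hhigh : PySem.List.slice g (some ((L.length : Nat) : Int)) none = H := by
    rw [PySem.List.slice_from_natCast, ← hsplit, List.drop_left]
  have hlen : L.length + H.length = g.length := by rw [← hsplit]; simp
  have hsum : L.sum + H.sum = g.sum := by rw [← hsplit]; simp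
  have hglen : (g.length : Int) = (L.length : Int) + (H.length : Int) := by exact_mod_cast hlen.symm
  have hpermL : (Ground.filter (fun v => decide (v ≤ h_))).Perm L := (hperm.filter _).symm
  have hpermH : (Ground.filter (fun v => decide (h_ < v))).Perm H := (hperm.filter _).symm
  have hE : ((Ground.filter (fun v => h_ < v)).map (fun v => v - h_)).sum
      = H.sum - (H.length : Int) * h_ := by
    rw [(hpermH.map (fun v => v - h_)).sum_eq, hH, sum_map_sub_const]
  have hD : ((Ground.filter (fun v => v ≤ h_)).map (fun v => h_ - v)).sum
      = (L.length : Int) * h_ - L.sum := by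
    rw [(hpermL.map (fun v => h_ - v)).sum_eq, hL, sum_map_const_sub]
  simp only [hidx, hlow, hhigh, hE, hD]
  have hc : B + (H.sum - (H.length : Int) * h_) - ((L.length : Int) * h_ - L.sum)
      = B + g.sum - (g.length : Int) * h_ := by linear_combination hsum + h_ * hglen
  split_ifs with ha hb hb
  · rfl
  · exact absurd (hc ▸ ha) hb
  · exact absurd (hc ▸ hb) ha
  · linear_combination 2 * h_ * hglen
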